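-- pv_equiv track=rewrite | github.com/ACascarino/advent_of_code_2020 | day24/part2.py | parse
-- ===== SOURCE A (Python) =====
-- def parse(instruction):
--     composite = None
--     results = []
--     for char in instruction:
--         if char == "n" or char == "s":
--             composite = char
--             continue
--         else:
--             result = composite + char if composite is not None else char
--             composite = None
--             results.append(result)
--     return results
-- ===== SOURCE B (Python) =====
-- def parse(instruction):
--     tokens = []
--     i = 0
--     n = len(instruction)
--     while i < n:
--         c = instruction[i]
--         if c == "n" or c == "s":
--             if i + 1 < n and instruction[i + 1] != "n" and instruction[i + 1] != "s":
--                 tokens.append(instruction[i:i + 2])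
--                 i += 2
--             else:
--                 i += 1
--         else:
--             tokens.append(c)
--             i += 1
--     return tokens
-- ===== Notes on version B (the rewrite author's own statement) =====
-- stated objective: alternative
-- what changed: Replaces the carried composite-prefix flag state machine with a stateless index-based lookahead scanner that emits a two-char token when an 'n'/'s' is immediately followed by a non-prefix char and otherwise skips or emits single chars.
import Mathlib
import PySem

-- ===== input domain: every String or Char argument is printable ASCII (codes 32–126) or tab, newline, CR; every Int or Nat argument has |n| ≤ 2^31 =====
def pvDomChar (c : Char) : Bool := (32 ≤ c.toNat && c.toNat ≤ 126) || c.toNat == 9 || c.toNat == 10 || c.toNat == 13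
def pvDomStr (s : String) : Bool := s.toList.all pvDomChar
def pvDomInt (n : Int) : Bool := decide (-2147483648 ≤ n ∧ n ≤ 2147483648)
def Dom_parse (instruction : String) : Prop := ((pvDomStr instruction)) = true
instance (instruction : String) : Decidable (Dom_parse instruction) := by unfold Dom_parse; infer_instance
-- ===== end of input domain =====

-- B replaces A's carried composite-prefix state machine with a stateless index/lookahead scanner; objective: alternative (same cost).


-- ===== PORT A =====
-- A's for-loop over the characters, carrying the mutable state (composite, results).
def parseLoop (composite : Option Char) (results : List String) : List Char → List String
  | [] => results
  | c :: rest =>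
    if c = 'n' ∨ c = 's' then
      parseLoop (some c) results rest
    else
      parseLoop none
        (results ++ [match composite with
                     | some p => String.mk [p, c]
                     | none => String.mk [c]]) rest

def parse (instruction : String) : List String :=
  parseLoop none [] instruction.toList

-- ===== PORT B =====
-- B's while-loop over index i with one-character lookahead, transcribed as recursion on
-- the remaining characters (i < n ↔ the list is nonempty; instruction[i+1] ↔ the second element).
def scanTokens : List Char → List String
  | [] => []
  | [c] => if c = 'n' ∨ c = 's' then [] else [String.mk [c]]
  | c :: d :: rest =>
    if c = 'n' ∨ c = 's' then
      if d ≠ 'n' ∧ d ≠ 's' then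
        String.mk [c, d] :: scanTokens rest
      else
        scanTokens (d :: rest)
    else
      String.mk [c] :: scanTokens (d :: rest)

def parse_alt (instruction : String) : List String :=
  scanTokens instruction.toList

-- ===== PRECONDITION & SPEC =====
def Spec_parse (instruction : String) (out : List String) : Prop := out = parse_alt instruction
instance (instruction : String) (out : List String) : Decidable (Spec_parse instruction out) := by unfold Spec_parse; infer_instance

-- ===== CLAIM (what is proved, stated in full; the proofs are below) =====
def Claim_equal_parse : Prop := ∀ (instruction : String), Dom_parse instruction → Spec_parse instruction (parse instruction)

-- ===== LEMMAS AND PROOFS =====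

-- Encode A's composite state as the prefix of unconsumed characters it represents.
def compChars : Option Char → List Char
  | none => []
  | some p => [p]

-- Core invariant: A's loop from state (composite, results) produces results ++ the tokens B's
-- scanner yields on the represented prefix followed by the remaining input — provided the
-- composite, if present, is an 'n'/'s' character (true in every reachable state of A).
theorem parseLoop_eq_scan (l : List Char) :
    ∀ (comp : Option Char) (res : List String),
      (comp = none ∨ ∃ p, comp = some p ∧ (p = 'n' ∨ p = 's')) →
      parseLoop comp res l = res ++ scanTokens (compChars comp ++ l) := by
  induction l with
  | nil =>
    intro comp res h
    rcases h with h | ⟨p, hp, hps⟩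
    · subst h; simp [parseLoop, compChars, scanTokens]
    · subst hp; simp [parseLoop, compChars, scanTokens, hps]
  | cons c rest ih =>
    intro comp res h
    by_cases hc : c = 'n' ∨ c = 's'
    · -- A stores c as the new composite; B's scanner drops any previous prefix before c.
      have hB : scanTokens (compChars comp ++ c :: rest) = scanTokens (c :: rest) := by
        rcases h with h | ⟨p, hp, hps⟩
        · subst h; simp [compChars]
        · subst hp
          rcases hc with hc | hc <;> rcases hps with hp' | hp' <;>
            simp [compChars, scanTokens, hc, hp']
      rw [hB]
      simp only [parseLoop, if_pos hc]
      exact ih (some c) res (Or.inr ⟨c, rfl, hc⟩)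
    · -- c is a token-ending character: both emit the same token and continue with no prefix.
      push_neg at hc
      have hA : parseLoop comp res (c :: rest) =
          parseLoop none
            (res ++ [match comp with
                     | some p => String.mk [p, c]
                     | none => String.mk [c]]) rest := by
        simp only [parseLoop]
        rw [if_neg (by push_neg; exact hc)]
      rw [hA, ih none _ (Or.inl rfl)]
      rcases h with h | ⟨p, hp, hps⟩
      · subst h
        cases rest with
        | nil => simp [compChars, scanTokens, hc.1, hc.2]
        | cons d rs => simp [compChars, scanTokens, hc.1, hc.2]
      · subst hp
        have hpns : p = 'n' ∨ p = 's' := hps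
        rcases hpns with hp' | hp' <;>
          simp [compChars, scanTokens, hp', hc.1, hc.2]

-- ===== VERDICT (by name: the statement is the Claim_ definition above) =====
theorem parse_spec : Claim_equal_parse := by
  intro instruction _
  unfold Spec_parse parse parse_alt
  simpa using parseLoop_eq_scan instruction.toList none [] (Or.inl rfl)
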